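-- pv_equiv track=rewrite | github.com/alexandraback/datacollection | solutions_5631989306621952_0/Python/matwetu/r1a.py | solve
-- ===== SOURCE A (Python) =====
-- def solve(s):
--     ret = []
--     for c in s:
--         if not ret or ord(c) >= ord(ret[0]):
--             ret.insert(0, c)
--         else:
--             ret.append(c)
--     return ''.join(ret)
-- ===== SOURCE B (Python) =====
-- def solve(s):
--     # Divide and conquer: a char belongs to the front group iff it is >= every
--     # char before it; merge two halves by and-ing the right half's flags with
--     # 'char >= max(left half)'.
--     def dc(cs):
--         # (front-flags, maximum) of a nonempty chunk
--         if len(cs) == 1: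
--             return [True], cs[0]
--         mid = len(cs) // 2
--         fl, ml = dc(cs[:mid])
--         fr, mr = dc(cs[mid:])
--         return fl + [f and c >= ml for f, c in zip(fr, cs[mid:])], max(ml, mr)
--
--     if not s:
--         return ''
--     flags, _ = dc(s)
--     front = [c for c, f in zip(s, flags) if f]
--     back = [c for c, f in zip(s, flags) if not f]
--     return ''.join(reversed(front)) + ''.join(back)
-- ===== Notes on version B (the rewrite author's own statement) =====
-- stated objective: faster
-- what changed: B replaces A's loop that mutates one list with O(n) front-inserts by a divide-and-conquer: it recursively computes a per-char flag saying whether the char is at least every char before it (merging halves by and-ing the right half's flags with a comparison against the left half's maximum), then partitions the chars by flag and returns the reversed front group followed by the back group.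
import Mathlib
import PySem

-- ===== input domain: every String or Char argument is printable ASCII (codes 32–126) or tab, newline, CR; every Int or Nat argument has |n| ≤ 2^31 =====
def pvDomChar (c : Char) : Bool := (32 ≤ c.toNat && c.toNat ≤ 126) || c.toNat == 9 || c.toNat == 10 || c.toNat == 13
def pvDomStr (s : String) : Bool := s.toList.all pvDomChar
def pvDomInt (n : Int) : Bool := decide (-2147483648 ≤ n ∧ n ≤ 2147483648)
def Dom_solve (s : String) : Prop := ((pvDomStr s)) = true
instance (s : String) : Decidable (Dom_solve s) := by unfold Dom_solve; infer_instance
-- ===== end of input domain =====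

-- B replaces A's quadratic front-insert loop by a divide-and-conquer pass that
-- computes, for each char, whether it is >= every char before it, then splits
-- the string into the two groups and concatenates reversed front with back.

-- ===== PORT A =====
def solveStepA (ret : List Char) (c : Char) : List Char :=
  match ret with
  | [] => c :: ret
  | h :: _ => if c.toNat ≥ h.toNat then c :: ret else ret ++ [c]

def solve (s : String) : String :=
  String.ofList (s.toList.foldl solveStepA [])

-- ===== PORT B =====
-- dc(cs): (front-flags, maximum) of a nonempty chunk; the [] branch is an
-- unreachable totality guard (Python's dc is only called on nonempty chunks)
def dcB (cs : List Char) : List Bool × Char :=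
  if _h1 : cs.length = 1 then ([true], cs.headD default)
  else if _h0 : cs.length = 0 then ([], default)
  else
    let mid := cs.length / 2
    let l := dcB (cs.take mid)
    let r := dcB (cs.drop mid)
    (l.1 ++ ((r.1.zip (cs.drop mid)).map fun fc => fc.1 && decide (l.2 ≤ fc.2)),
     max l.2 r.2)
termination_by cs.length
decreasing_by
  · simp only [List.length_take]; omega
  · simp only [List.length_drop]; omega

def solve_alt (s : String) : String :=
  let cs := s.toList
  if cs.isEmpty then String.ofList []
  else
    let flags := (dcB cs).1
    let front := (cs.zip flags).filterMap (fun cf => if cf.2 then some cf.1 else none)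
    let back := (cs.zip flags).filterMap (fun cf => if !cf.2 then some cf.1 else none)
    String.ofList (front.reverse ++ back)


-- ===== PRECONDITION & SPEC =====
def Spec_solve (s : String) (out : String) : Prop := out = solve_alt s
instance (s : String) (out : String) : Decidable (Spec_solve s out) := by unfold Spec_solve; infer_instance

-- ===== CLAIM (what is proved, stated in full; the proofs are below) =====
def Claim_equal_solve : Prop := ∀ (s : String), Dom_solve s → Spec_solve s (solve s)

-- ===== LEMMAS AND PROOFS =====
-- spec-side flags: entry i is 'cs[i] >= every char of cs[:i+1]'
def flagsOf (cs : List Char) : List Bool :=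
  (List.range cs.length).map (fun i => decide (∀ x ∈ cs.take (i+1), x ≤ cs.getD i default))

theorem length_flagsOf (cs : List Char) : (flagsOf cs).length = cs.length := by
  simp [flagsOf]

theorem flagsOf_merge (L R : List Char) (ml : Char) (hml : ml ∈ L)
    (hmax : ∀ x ∈ L, x ≤ ml) :
    flagsOf (L ++ R) = flagsOf L ++ ((flagsOf R).zip R).map (fun fc => fc.1 && decide (ml ≤ fc.2)) := by
  apply List.ext_getElem
  · simp [length_flagsOf, List.length_zip]
  · intro i h1 h2
    rw [length_flagsOf] at h1
    by_cases hi : i < L.length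
    · rw [List.getElem_append_left (by rwa [length_flagsOf])]
      simp only [flagsOf, List.getElem_map, List.getElem_range]
      rw [List.take_append_of_le_length (by omega),
        List.getD_eq_getElem _ _ (by simpa using h1),
        List.getD_eq_getElem _ _ hi,
        List.getElem_append_left hi]
    · obtain ⟨j, hj⟩ : ∃ j, i = L.length + j := ⟨i - L.length, by omega⟩
      subst hj
      have hjR : j < R.length := by rw [List.length_append] at h1; omega
      rw [List.getElem_append_right (by simp [length_flagsOf])]
      simp only [List.getElem_map, List.getElem_zip, length_flagsOf]
      simp only [flagsOf, List.getElem_map, List.getElem_range]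
      have htake : (L ++ R).take (L.length + j + 1) = L ++ R.take (j + 1) := by
        rw [List.take_append, List.take_of_length_le (by omega)]
        have he : L.length + j + 1 - L.length = j + 1 := by omega
        rw [he]
      have hgd : (L ++ R).getD (L.length + j) default = R[j] := by
        rw [List.getD_eq_getElem _ _ (by simpa using h1),
          List.getElem_append_right (by omega)]
        congr 1
        omega
      have hgd2 : R.getD j default = R[j] := List.getD_eq_getElem _ _ hjR
      simp only [Nat.add_sub_cancel_left]
      rw [htake, hgd, hgd2, ← Bool.decide_and, decide_eq_decide]
      constructor
      · intro hall
        exact ⟨fun x hx => hall x (List.mem_append.2 (Or.inr hx)), hall ml (List.mem_append.2 (Or.inl hml))⟩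
      · rintro ⟨hr, hml'⟩ x hx
        rcases List.mem_append.1 hx with h' | h'
        · exact le_trans (hmax x h') hml'
        · exact hr x h'

theorem flagsOf_singleton (c : Char) : flagsOf [c] = [true] := by
  simp [flagsOf, List.range_succ]

theorem dcB_spec (cs : List Char) (h : cs ≠ []) :
    (dcB cs).1 = flagsOf cs ∧ (dcB cs).2 ∈ cs ∧ ∀ x ∈ cs, x ≤ (dcB cs).2 := by
  induction hn : cs.length using Nat.strong_induction_on generalizing cs with
  | _ n ih =>
  subst hn
  rw [dcB]
  by_cases h1 : cs.length = 1
  · obtain ⟨c, rfl⟩ : ∃ c, cs = [c] := by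
      match cs, h1 with | [c], _ => exact ⟨c, rfl⟩
    simp [flagsOf_singleton]
  · have h0 : cs.length ≠ 0 := by simpa using h
    rw [dif_neg h1, dif_neg h0]
    have hlen2 : 2 ≤ cs.length := by omega
    have hLne : cs.take (cs.length / 2) ≠ [] := by
      simp [List.take_eq_nil_iff, h]
      omega
    have hRne : cs.drop (cs.length / 2) ≠ [] := by
      simp [List.drop_eq_nil_iff]
      omega
    obtain ⟨hLf, hLmem, hLmax⟩ := ih (cs.take (cs.length / 2)).length
      (by simp; omega) _ hLne rfl
    obtain ⟨hRf, hRmem, hRmax⟩ := ih (cs.drop (cs.length / 2)).length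
      (by simp; omega) _ hRne rfl
    have hsplit : cs.take (cs.length / 2) ++ cs.drop (cs.length / 2) = cs :=
      List.take_append_drop _ _
    refine ⟨?_, ?_, ?_⟩
    · show (dcB (cs.take (cs.length / 2))).1 ++ _ = _
      rw [hLf, hRf]
      calc flagsOf (cs.take (cs.length / 2)) ++
            ((flagsOf (cs.drop (cs.length / 2))).zip (cs.drop (cs.length / 2))).map
              (fun fc => fc.1 && decide ((dcB (cs.take (cs.length / 2))).2 ≤ fc.2))
          = flagsOf (cs.take (cs.length / 2) ++ cs.drop (cs.length / 2)) :=
            (flagsOf_merge _ _ _ hLmem hLmax).symm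
        _ = flagsOf cs := by rw [hsplit]
    · show max (dcB (cs.take (cs.length / 2))).2 (dcB (cs.drop (cs.length / 2))).2 ∈ cs
      rcases max_choice (dcB (cs.take (cs.length / 2))).2 (dcB (cs.drop (cs.length / 2))).2 with hm | hm
      · rw [hm]; exact List.mem_of_mem_take hLmem
      · rw [hm]; exact List.mem_of_mem_drop hRmem
    · show ∀ x ∈ cs, x ≤ max (dcB (cs.take (cs.length / 2))).2 (dcB (cs.drop (cs.length / 2))).2
      intro x hx
      rw [← hsplit] at hx
      rcases List.mem_append.1 hx with h' | h'
      · exact le_trans (hLmax x h') (le_max_left _ _)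
      · exact le_trans (hRmax x h') (le_max_right _ _)

theorem char_le_iff_toNat (a b : Char) : a ≤ b ↔ a.toNat ≤ b.toNat := by
  rw [Char.le_def, UInt32.le_iff_toNat_le]; rfl

def frontSpec (cs : List Char) : List Char :=
  (cs.zip (flagsOf cs)).filterMap (fun cf => if cf.2 then some cf.1 else none)
def backSpec (cs : List Char) : List Char :=
  (cs.zip (flagsOf cs)).filterMap (fun cf => if !cf.2 then some cf.1 else none)

theorem flagsOf_append_singleton (cs : List Char) (c : Char) :
    flagsOf (cs ++ [c]) = flagsOf cs ++ [decide (∀ x ∈ cs, x ≤ c)] := by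
  apply List.ext_getElem
  · simp [length_flagsOf]
  · intro i h1 h2
    rw [length_flagsOf, List.length_append, List.length_singleton] at h1
    by_cases hi : i < cs.length
    · rw [List.getElem_append_left (by rwa [length_flagsOf])]
      simp only [flagsOf, List.getElem_map, List.getElem_range]
      rw [List.take_append_of_le_length (by omega),
        List.getD_eq_getElem _ _ (by simp; omega),
        List.getD_eq_getElem _ _ hi,
        List.getElem_append_left hi]
    · have hieq : i = cs.length := by omega
      subst hieq
      rw [List.getElem_append_right (by rw [length_flagsOf])]
      simp only [flagsOf, List.getElem_map, List.getElem_range, List.getElem_singleton]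
      rw [List.take_of_length_le (by simp),
        List.getD_eq_getElem _ _ (by simp),
        List.getElem_append_right (le_refl _)]
      simp only [Nat.sub_self, List.getElem_singleton]
      rw [decide_eq_decide]
      constructor
      · intro hall x hx; exact hall x (List.mem_append.2 (Or.inl hx))
      · intro hall x hx
        rcases List.mem_append.1 hx with h' | h'
        · exact hall x h'
        · simp at h'; simp [h']

theorem frontSpec_append (cs : List Char) (c : Char) :
    frontSpec (cs ++ [c]) = frontSpec cs ++ (if (∀ x ∈ cs, x ≤ c) then [c] else []) := by
  have h2 : [(c, decide (∀ x ∈ cs, x ≤ c))].filterMap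
      (fun cf => if cf.2 then some cf.1 else none) = (if (∀ x ∈ cs, x ≤ c) then [c] else []) := by
    by_cases h : ∀ x ∈ cs, x ≤ c
    · rw [decide_eq_true h]; simp; exact h
    · rw [decide_eq_false h]; simp [h]
  unfold frontSpec
  rw [flagsOf_append_singleton, List.zip_append (by rw [length_flagsOf]),
    List.filterMap_append, List.zip_cons_cons, List.zip_nil_right, h2]

theorem backSpec_append (cs : List Char) (c : Char) :
    backSpec (cs ++ [c]) = backSpec cs ++ (if (∀ x ∈ cs, x ≤ c) then [] else [c]) := by
  have h2 : [(c, decide (∀ x ∈ cs, x ≤ c))].filterMap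
      (fun cf => if !cf.2 then some cf.1 else none) = (if (∀ x ∈ cs, x ≤ c) then [] else [c]) := by
    by_cases h : ∀ x ∈ cs, x ≤ c
    · rw [decide_eq_true h]; simp; exact h
    · rw [decide_eq_false h]; simp [h]
  unfold backSpec
  rw [flagsOf_append_singleton, List.zip_append (by rw [length_flagsOf]),
    List.filterMap_append, List.zip_cons_cons, List.zip_nil_right, h2]

theorem solve_invariant (cs : List Char) :
    cs.foldl solveStepA [] = (frontSpec cs).reverse ++ backSpec cs ∧
    (cs ≠ [] → ∃ m rest, (frontSpec cs).reverse = m :: rest ∧ m ∈ cs ∧ ∀ x ∈ cs, x ≤ m) := by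
  induction cs using List.reverseRecOn with
  | nil => exact ⟨rfl, fun h => absurd rfl h⟩
  | append_singleton cs c ih =>
    obtain ⟨hfold, hhead⟩ := ih
    rw [List.foldl_append, List.foldl_cons, List.foldl_nil, hfold,
      frontSpec_append, backSpec_append]
    rcases List.eq_nil_or_concat' cs with rfl | ⟨cs', c', rfl⟩
    · have hf : frontSpec [] = [] := rfl
      have hb : backSpec [] = [] := rfl
      constructor
      · simp [solveStepA, hf, hb]
      · intro _
        exact ⟨c, [], by simp [hf], by simp, by simp⟩
    · obtain ⟨m, rest, hrev, hmmem, hmax⟩ := hhead (by simp)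
      rw [hrev]
      have hcmp : (c.toNat ≥ m.toNat) ↔ (∀ x ∈ cs' ++ [c'], x ≤ c) := by
        constructor
        · intro hge x hx
          exact le_trans (hmax x hx) ((char_le_iff_toNat m c).2 hge)
        · intro hall
          exact (char_le_iff_toNat m c).1 (hall m hmmem)
      by_cases hc : ∀ x ∈ cs' ++ [c'], x ≤ c
      · rw [if_pos hc, if_pos hc]
        constructor
        · simp only [List.cons_append, solveStepA, if_pos (hcmp.2 hc)]
          simp [hrev]
        · intro _
          refine ⟨c, m :: rest, by simp [hrev], by simp, ?_⟩
          intro x hx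
          rcases List.mem_append.1 hx with h' | h'
          · exact hc x h'
          · simp at h'; simp [h']
      · rw [if_neg hc, if_neg hc]
        have hstep : solveStepA (m :: rest ++ backSpec (cs' ++ [c'])) c
            = (m :: rest ++ backSpec (cs' ++ [c'])) ++ [c] := by
          simp only [solveStepA, List.cons_append]
          rw [if_neg (fun hge => hc (hcmp.1 hge))]
        constructor
        · rw [List.cons_append] at hstep ⊢
          rw [hstep]; simp [hrev]
        · intro _
          refine ⟨m, rest, by simpa using hrev, ?_, ?_⟩
          · rcases List.mem_append.1 hmmem with h' | h'
            · simp [h']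
            · simp at h'; simp [h']
          · intro x hx
            rcases List.mem_append.1 hx with h' | h'
            · exact hmax x h'
            · simp at h'; subst h'
              rcases lt_or_ge x m with hlt | hge
              · exact le_of_lt hlt
              · exact absurd (hcmp.1 ((char_le_iff_toNat m x).1 hge)) hc

theorem solve_eq_alt (s : String) : solve s = solve_alt s := by
  unfold solve solve_alt
  rcases hcs : s.toList with _ | ⟨c, cs⟩
  · rfl
  · rw [← hcs]
    have hne : s.toList ≠ [] := by rw [hcs]; simp
    have hflags : (dcB s.toList).1 = flagsOf s.toList := (dcB_spec _ hne).1
    simp only [List.isEmpty_iff, if_neg hne, hflags]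
    rw [(solve_invariant s.toList).1]
    rfl

-- ===== VERDICT (by name: the statement is the Claim_ definition above) =====
theorem solve_spec : Claim_equal_solve := by
  intro s _
  unfold Spec_solve
  exact solve_eq_alt s
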